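-- pv_equiv track=rewrite | github.com/JasonVranek/ethspectoor | link.py | build_unified_type_map
-- ===== SOURCE A (Python) =====
-- def build_unified_type_map(indexes: dict) -> dict:
--     priority = {
--         "ethereum/consensus-specs": 1,
--         "ethereum/execution-specs": 2,
--         "ethereum/builder-specs": 3,
--         "flashbots/relay-specs": 4,
--         "ethereum/beacon-APIs": 5,
--         "ethereum/execution-apis": 6,
--         "ethereum/remote-signing-api": 7,
--     }
--
--     unified = {}
--     for spec_name, data in indexes.items():
--         type_map = data.get("_type_map", {})
--         for type_name, info in type_map.items():
--             source = info["source"]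
--             if type_name not in unified:
--                 unified[type_name] = info
--             else:
--                 existing_priority = priority.get(unified[type_name]["source"], 99)
--                 new_priority = priority.get(source, 99)
--                 if new_priority < existing_priority:
--                     unified[type_name] = info
--
--     return unified
-- ===== SOURCE B (Python) =====
-- def build_unified_type_map(indexes: dict) -> dict:
--     priority = {
--         "ethereum/consensus-specs": 1,
--         "ethereum/execution-specs": 2,
--         "ethereum/builder-specs": 3,
--         "flashbots/relay-specs": 4,
--         "ethereum/beacon-APIs": 5,
--         "ethereum/execution-apis": 6,
--         "ethereum/remote-signing-api": 7,
--     }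
--
--     # First pass: group every candidate info per type name, in encounter order.
--     candidates = {}
--     for spec_name, data in indexes.items():
--         for type_name, info in data.get("_type_map", {}).items():
--             candidates.setdefault(type_name, []).append(info)
--
--     # Second pass: per type name, keep the best-priority candidate.
--     # min is stable (first minimum), matching first-seen-wins on priority ties.
--     return {
--         type_name: min(infos, key=lambda i: priority.get(i["source"], 99))
--         for type_name, infos in candidates.items()
--     }
-- ===== Notes on version B (the rewrite author's own statement) =====
-- stated objective: alternative
-- what changed: B replaces A's single keep-or-replace fold over a dict with a two-phase group-then-reduce: first pass groups all candidate infos per type name, second pass picks each group's winner with a stable min keyed by source priority.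
import Mathlib
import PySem

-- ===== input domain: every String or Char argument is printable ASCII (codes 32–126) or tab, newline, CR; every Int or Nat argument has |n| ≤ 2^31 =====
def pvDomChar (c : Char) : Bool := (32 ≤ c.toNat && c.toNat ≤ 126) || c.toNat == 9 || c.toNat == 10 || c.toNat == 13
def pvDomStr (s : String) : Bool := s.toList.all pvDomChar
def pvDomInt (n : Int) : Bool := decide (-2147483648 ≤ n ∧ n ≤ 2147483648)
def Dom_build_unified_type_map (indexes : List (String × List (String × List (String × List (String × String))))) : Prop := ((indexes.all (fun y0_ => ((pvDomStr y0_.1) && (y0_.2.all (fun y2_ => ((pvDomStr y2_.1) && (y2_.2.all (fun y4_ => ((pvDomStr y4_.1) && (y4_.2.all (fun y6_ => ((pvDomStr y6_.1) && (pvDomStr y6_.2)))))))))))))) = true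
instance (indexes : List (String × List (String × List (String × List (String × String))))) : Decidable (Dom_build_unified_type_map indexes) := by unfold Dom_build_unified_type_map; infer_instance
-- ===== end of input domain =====

-- B groups all candidate infos per type name in one pass and then picks each group's
-- first minimal-priority info with a stable min, instead of A's keep-or-replace fold:
-- an alternative decomposition of the same task, same asymptotic cost.

-- ===== PORT A =====
-- the priority table (identical literal in Source A and Source B)
def pvPriority : PySem.Dict String Int := PySem.Dict.ofList
  [("ethereum/consensus-specs", 1), ("ethereum/execution-specs", 2),
   ("ethereum/builder-specs", 3), ("flashbots/relay-specs", 4),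
   ("ethereum/beacon-APIs", 5), ("ethereum/execution-apis", 6),
   ("ethereum/remote-signing-api", 7)]

def build_unified_type_map (indexes : List (String × List (String × List (String × List (String × String))))) : List (String × List (String × String)) :=
  let unified : PySem.Dict String (List (String × String)) :=
    (PySem.Dict.ofList indexes).items.foldl (fun unified sd =>
      let type_map := (PySem.Dict.ofList sd.2).getD "_type_map" []
      (PySem.Dict.ofList type_map).items.foldl (fun unified ti =>
        -- info["source"]: total getD form, exact under Pre_ (missing key = KeyError, excluded)
        let source := (PySem.Dict.ofList ti.2).getD "source" ""
        if unified.contains ti.1 = false then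
          unified.insert ti.1 ti.2
        else
          let existing_priority := pvPriority.getD ((PySem.Dict.ofList (unified.getD ti.1 [])).getD "source" "") 99
          let new_priority := pvPriority.getD source 99
          if new_priority < existing_priority then unified.insert ti.1 ti.2
          else unified) unified) PySem.Dict.empty
  unified.items

-- ===== PORT B =====
-- Source B's min key: lambda i: priority.get(i["source"], 99)  (i["source"] total under Pre_)
def pvKey (i : List (String × String)) : Int :=
  pvPriority.getD ((PySem.Dict.ofList i).getD "source" "") 99

def build_unified_type_map_alt (indexes : List (String × List (String × List (String × List (String × String))))) : List (String × List (String × String)) :=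
  let candidates : PySem.Dict String (List (List (String × String))) :=
    (PySem.Dict.ofList indexes).items.foldl (fun c sd =>
      (PySem.Dict.ofList ((PySem.Dict.ofList sd.2).getD "_type_map" [])).items.foldl
        (fun c ti => c.modify ti.1 [] (fun xs => xs ++ [ti.2])) c) PySem.Dict.empty
  (candidates.items.foldl (fun u p =>
      u.insert p.1 (PySem.List.minD p.2 pvKey [])) PySem.Dict.empty).items

-- ===== PRECONDITION & SPEC =====
-- Pre_ excludes exactly the inputs on which Python A raises KeyError: some info dict
-- reached by the loops (an entry of a dict's "_type_map" value) has no "source" key.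
def Pre_build_unified_type_map (indexes : List (String × List (String × List (String × List (String × String))))) : Prop :=
  ∀ p ∈ (PySem.Dict.ofList indexes).items,
    ∀ q ∈ (PySem.Dict.ofList ((PySem.Dict.ofList p.2).getD "_type_map" [])).items,
      (PySem.Dict.ofList q.2).contains "source" = true
instance (indexes : List (String × List (String × List (String × List (String × String))))) : Decidable (Pre_build_unified_type_map indexes) := by unfold Pre_build_unified_type_map; infer_instance

def pvWitness_build_unified_type_map : (List (String × List (String × List (String × List (String × String))))) :=
  [("specA", [("_type_map", [("Block", [("source", "ethereum/execution-specs")])])]),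
   ("specB", [("_type_map", [("Block", [("source", "ethereum/consensus-specs")])])])]

def Spec_build_unified_type_map (indexes : List (String × List (String × List (String × List (String × String))))) (out : List (String × List (String × String))) : Prop := out = build_unified_type_map_alt indexes
instance (indexes : List (String × List (String × List (String × List (String × String))))) (out : List (String × List (String × String))) : Decidable (Spec_build_unified_type_map indexes out) := by unfold Spec_build_unified_type_map; infer_instance

-- ===== CLAIM (what is proved, stated in full; the proofs are below) =====
def Claim_equal_build_unified_type_map : Prop := ∀ (indexes : List (String × List (String × List (String × List (String × String))))), Dom_build_unified_type_map indexes → Pre_build_unified_type_map indexes → Spec_build_unified_type_map indexes (build_unified_type_map indexes)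

-- ===== LEMMAS AND PROOFS =====

-- A's loop body (zeta-/delta-equal to the inline lambda of the port of A)
def pvStepA (u : PySem.Dict String (List (String × String))) (ti : String × List (String × String)) : PySem.Dict String (List (String × String)) :=
  if u.contains ti.1 = false then u.insert ti.1 ti.2
  else if pvKey ti.2 < pvKey (u.getD ti.1 []) then u.insert ti.1 ti.2 else u

-- the flattened sequence of (type_name, info) pairs both programs traverse
def pvFlat (indexes : List (String × List (String × List (String × List (String × String))))) : List (String × List (String × String)) :=
  (PySem.Dict.ofList indexes).items.flatMap
    (fun sd => (PySem.Dict.ofList ((PySem.Dict.ofList sd.2).getD "_type_map" [])).items)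

theorem pvFoldlNested {σ α β : Type} (g : α → List β) (step : σ → β → σ) (l : List α) (init : σ) :
    l.foldl (fun acc x => (g x).foldl step acc) init = (l.flatMap g).foldl step init := by
  induction l generalizing init with
  | nil => rfl
  | cons x xs ih => simp [List.flatMap_cons, List.foldl_append, ih]

theorem pvA_eq (indexes : List (String × List (String × List (String × List (String × String))))) :
    build_unified_type_map indexes = ((pvFlat indexes).foldl pvStepA PySem.Dict.empty).items := by
  show ((PySem.Dict.ofList indexes).items.foldl
      (fun u sd => ((PySem.Dict.ofList ((PySem.Dict.ofList sd.2).getD "_type_map" [])).items).foldl pvStepA u)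
      PySem.Dict.empty).items = _
  rw [pvFoldlNested]
  rfl

theorem pvB_eq (indexes : List (String × List (String × List (String × List (String × String))))) :
    build_unified_type_map_alt indexes =
      (((pvFlat indexes).foldl (fun c ti => c.modify ti.1 [] (fun xs => xs ++ [ti.2]))
          (PySem.Dict.empty : PySem.Dict String (List (List (String × String))))).items.foldl
        (fun u p => u.insert p.1 (PySem.List.minD p.2 pvKey [])) PySem.Dict.empty).items := by
  show (((PySem.Dict.ofList indexes).items.foldl
      (fun c sd => ((PySem.Dict.ofList ((PySem.Dict.ofList sd.2).getD "_type_map" [])).items).foldl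
        (fun c ti => c.modify ti.1 [] (fun xs => xs ++ [ti.2])) c)
      PySem.Dict.empty).items.foldl
        (fun u p => u.insert p.1 (PySem.List.minD p.2 pvKey [])) PySem.Dict.empty).items = _
  rw [pvFoldlNested]
  rfl

theorem pvMin?_append {α κ : Type} [LT κ] [DecidableLT κ] (xs : List α) (x : α) (key : α → κ) :
    PySem.List.min? (xs ++ [x]) key =
      match PySem.List.min? xs key with
      | none => some x
      | some m => if key x < key m then some x else some m := by
  simp only [PySem.List.min?, List.foldl_append, List.foldl_cons, List.foldl_nil]
  rfl

theorem pvMin?_isSome {α κ : Type} [LT κ] [DecidableLT κ] (xs : List α) (key : α → κ) (h : xs ≠ []) :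
    (PySem.List.min? xs key).isSome := by
  induction xs using List.reverseRecOn with
  | nil => exact absurd rfl h
  | append_singleton ys y ih =>
    rw [pvMin?_append]
    cases PySem.List.min? ys key with
    | none => rfl
    | some m => dsimp only; split <;> rfl

theorem pvOfList_append_singleton {α : Type} [BEq α] (l : List α) (x : α) :
    PySem.Set.ofList (l ++ [x]) = (PySem.Set.ofList l).add x := by
  simp [PySem.Set.ofList, List.foldl_append]

theorem pvA_char (l : List (String × List (String × String))) :
    (l.foldl pvStepA PySem.Dict.empty).keys = PySem.Set.ofList (l.map Prod.fst)
    ∧ ∀ t, (l.foldl pvStepA PySem.Dict.empty).get? t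
        = PySem.List.min? ((l.filter (fun p => p.1 == t)).map Prod.snd) pvKey := by
  induction l using List.reverseRecOn with
  | nil =>
    constructor
    · rfl
    · intro t; rfl
  | append_singleton xs p ih =>
    obtain ⟨hk, hg⟩ := ih
    rw [List.foldl_append, List.foldl_cons, List.foldl_nil]
    set u := xs.foldl pvStepA PySem.Dict.empty with hu
    by_cases hc : u.contains p.1 = true
    · -- existing key
      have hmem : p.1 ∈ u.keys := (PySem.Dict.contains_iff_mem_keys u p.1).mp hc
      obtain ⟨m, hm⟩ : ∃ m, u.get? p.1 = some m := by
        rw [PySem.Dict.contains_eq_isSome_get?] at hc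
        exact Option.isSome_iff_exists.mp hc
      have hgetD : u.getD p.1 [] = m := PySem.Dict.getD_of_get?_eq_some u [] hm
      have hstep : pvStepA u p = if pvKey p.2 < pvKey m then u.insert p.1 p.2 else u := by
        rw [pvStepA, hc, hgetD]; simp
      constructor
      · rw [hstep]
        simp only [List.map_append, List.map_cons, List.map_nil]
        rw [pvOfList_append_singleton, ← hk]
        have hsc : PySem.Set.contains u.keys p.1 = true := by
          simp [PySem.Set.contains, hmem]
        have hadd : PySem.Set.add u.keys p.1 = u.keys := by
          unfold PySem.Set.add; rw [hsc]; simp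
        rw [hadd]
        split
        · exact PySem.Dict.keys_insert_of_contains u p.2 hc
        · rfl
      · intro t
        rw [hstep, List.filter_append, List.map_append]
        by_cases ht : t = p.1
        · subst ht
          have hfp : List.filter (fun q => q.1 == p.1) [p] = [p] := by simp
          rw [hfp]
          simp only [List.map_cons, List.map_nil]
          rw [pvMin?_append, ← hg p.1, hm]
          by_cases hlt : pvKey p.2 < pvKey m
          · rw [if_pos hlt, PySem.Dict.get?_insert_self]
            dsimp only
            rw [if_pos hlt]
          · rw [if_neg hlt, hm]
            dsimp only
            rw [if_neg hlt]
        · have hfp : List.filter (fun q => q.1 == t) [p] = [] := by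
            simp only [List.filter_cons, List.filter_nil]
            rw [if_neg]
            simp
            exact fun h => ht h.symm
          rw [hfp]
          simp only [List.map_nil, List.append_nil]
          rw [← hg t]
          split
          · exact PySem.Dict.get?_insert_of_ne u _ ht
          · rfl
    · -- new key
      have hc' : u.contains p.1 = false := by revert hc; cases u.contains p.1 <;> simp
      have hstep : pvStepA u p = u.insert p.1 p.2 := by rw [pvStepA, hc']; simp
      have hnone : u.get? p.1 = none := by
        rw [PySem.Dict.contains_eq_isSome_get?] at hc'
        cases h : u.get? p.1 with
        | none => rfl
        | some v => rw [h] at hc'; simp at hc'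
      constructor
      · rw [hstep, PySem.Dict.keys_insert_of_not_contains u p.2 hc']
        simp only [List.map_append, List.map_cons, List.map_nil]
        rw [pvOfList_append_singleton, ← hk]
        have hnmem : p.1 ∉ u.keys := fun h => by
          rw [(PySem.Dict.contains_iff_mem_keys u p.1).mpr h] at hc'; simp at hc'
        have hsc : PySem.Set.contains u.keys p.1 = false := by
          simp [PySem.Set.contains, hnmem]
        unfold PySem.Set.add; rw [hsc]; simp
      · intro t
        rw [hstep, List.filter_append, List.map_append]
        by_cases ht : t = p.1
        · subst ht
          have hfp : List.filter (fun q => q.1 == p.1) [p] = [p] := by simp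
          rw [hfp]
          simp only [List.map_cons, List.map_nil]
          rw [pvMin?_append, ← hg p.1, hnone, PySem.Dict.get?_insert]
          simp
        · have hfp : List.filter (fun q => q.1 == t) [p] = [] := by
            simp only [List.filter_cons, List.filter_nil]
            rw [if_neg]
            simp
            exact fun h => ht h.symm
          rw [hfp]
          simp only [List.map_nil, List.append_nil]
          rw [← hg t]
          exact PySem.Dict.get?_insert_of_ne u _ ht

-- ===== VERDICT (by name: the statement is the Claim_ definition above) =====
theorem build_unified_type_map_spec : Claim_equal_build_unified_type_map := by
  unfold Claim_equal_build_unified_type_map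
  intro indexes _ _
  unfold Spec_build_unified_type_map
  rw [pvA_eq, pvB_eq]
  set l := pvFlat indexes with hl
  obtain ⟨hk, hg⟩ := pvA_char l
  set A := l.foldl pvStepA PySem.Dict.empty with hA
  set cand := l.foldl (fun c ti => c.modify ti.1 [] (fun xs => xs ++ [ti.2]))
      (PySem.Dict.empty : PySem.Dict String (List (List (String × String)))) with hcand
  have hckeys : cand.keys = PySem.Set.ofList (l.map Prod.fst) := by
    have h := PySem.Dict.keys_foldl_modify_key (ν := List (List (String × String))) l
      (fun ti => ti.1) [] (fun _ ti xs => xs ++ [ti.2]) PySem.Dict.empty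
    simpa [PySem.Set.ofList] using h
  have hcnodup : cand.keys.Nodup := hckeys ▸ PySem.Set.nodup_ofList _
  have hcget : ∀ t, cand.getD t [] = (l.filter (fun p => p.1 == t)).map Prod.snd := by
    intro t
    have h := PySem.Dict.getD_foldl_modify_append l PySem.Dict.empty t
    simpa using h
  have hAnodup : A.keys.Nodup := hk ▸ PySem.Set.nodup_ofList _
  have hB : (cand.items.foldl (fun u p => u.insert p.1 (PySem.List.minD p.2 pvKey []))
        PySem.Dict.empty).items
      = cand.items.map (fun p => (p.1, PySem.List.minD p.2 pvKey [])) := by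
    have h := PySem.Dict.items_foldl_insert_fresh cand.items (fun p => p.1)
      (fun p => PySem.List.minD p.2 pvKey []) PySem.Dict.empty
      (fun a _ => by simp [PySem.Dict.contains_empty])
      (by simpa [PySem.Dict.keys] using hcnodup)
    simpa using h
  rw [hB, PySem.Dict.items_eq_map_keys A hAnodup [], PySem.Dict.items_eq_map_keys cand hcnodup [],
      List.map_map, hk, ← hckeys]
  apply List.map_congr_left
  intro k hkmem
  have hexists : ∃ p ∈ l, p.1 = k := by
    rw [hckeys] at hkmem
    rw [PySem.Set.mem_ofList] at hkmem
    obtain ⟨p, hp, hpk⟩ := List.mem_map.mp hkmem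
    exact ⟨p, hp, hpk⟩
  have hne : (l.filter (fun p => p.1 == k)).map Prod.snd ≠ [] := by
    obtain ⟨p, hp, hpk⟩ := hexists
    have : p ∈ l.filter (fun p => p.1 == k) := by
      rw [List.mem_filter]; exact ⟨hp, by simp [hpk]⟩
    intro h
    rw [List.map_eq_nil_iff] at h
    rw [h] at this
    exact absurd this (List.not_mem_nil)
  obtain ⟨m, hm⟩ : ∃ m, PySem.List.min? ((l.filter (fun p => p.1 == k)).map Prod.snd) pvKey = some m :=
    Option.isSome_iff_exists.mp (pvMin?_isSome _ _ hne)
  have h1 : A.getD k [] = m := PySem.Dict.getD_of_get?_eq_some A [] ((hg k).trans hm)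
  simp only [Function.comp]
  rw [h1, hcget k, PySem.List.minD, hm]
  rfl
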